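-- pv_equiv track=rewrite | github.com/IamConstantine/LeetCodeFiddle | python/CountVowels.py | countVowels_dp
-- ===== SOURCE A (Python) =====
-- def countVowels_dp(s: str):
--     dp = [0] * len(s)
--     dp[0] = 1 if s[0] in 'aknqy' else 0
--
--     for i in range(1, len(s)):
--         if s[i] in 'aknqy':
--             dp[i] = dp[i - 1] + (i + 1)
--         else:
--             dp[i] = dp[i - 1]
--
--     return sum(dp)
-- ===== SOURCE B (Python) =====
-- def countVowels_dp(s: str):
--     n = len(s)
--     total = n if s[0] in 'aknqy' else 0
--     for j in range(1, n):
--         if s[j] in 'aknqy':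
--             total += (j + 1) * (n - j)
--     return total
-- ===== Notes on version B (the rewrite author's own statement) =====
-- stated objective: faster
-- what changed: B replaces A's O(n)-extra-space dp array (cumulative weighted count, summed at the end) with a single running total that adds each vowel-position j's closed-form contribution (j+1)*(n-j) directly.
import Mathlib
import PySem

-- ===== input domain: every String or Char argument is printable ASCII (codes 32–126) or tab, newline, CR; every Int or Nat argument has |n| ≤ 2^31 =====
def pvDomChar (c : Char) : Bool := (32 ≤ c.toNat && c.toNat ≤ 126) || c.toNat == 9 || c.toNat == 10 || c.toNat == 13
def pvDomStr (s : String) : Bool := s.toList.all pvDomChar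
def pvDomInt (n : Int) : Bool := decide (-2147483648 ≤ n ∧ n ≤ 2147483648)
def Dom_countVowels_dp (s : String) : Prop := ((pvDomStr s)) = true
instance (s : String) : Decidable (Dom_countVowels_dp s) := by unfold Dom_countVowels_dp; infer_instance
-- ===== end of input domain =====

-- B replaces A's dp array (cumulative weighted count, summed at the end) with a single running
-- total adding each vowel position's closed-form contribution (j+1)*(n-j); O(1) extra space.

-- ===== PORT A =====
-- the characters of the Python string literal 'aknqy'
def pvVowels : List Char := ['a', 'k', 'n', 'q', 'y']

def countVowels_dp (s : String) : Int :=
  let cs := s.toList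
  let n := cs.length
  let dp : List Int := List.replicate n 0                     -- dp = [0] * len(s)
  -- dp[0] = 1 if s[0] in 'aknqy' else 0  (s[0] raises IndexError on empty s: excluded by Pre_)
  let dp := PySem.List.pySetD dp 0
      (if PySem.List.pyGetD cs 0 ' ' ∈ pvVowels then 1 else 0)
  let dp := (PySem.List.pyRange 1 (n : Int) 1).foldl (fun dp i =>
      if PySem.List.pyGetD cs i ' ' ∈ pvVowels then
        PySem.List.pySetD dp i (PySem.List.pyGetD dp (i - 1) 0 + (i + 1))
      else
        PySem.List.pySetD dp i (PySem.List.pyGetD dp (i - 1) 0)) dp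
  dp.sum

-- ===== PORT B =====
def countVowels_dp_alt (s : String) : Int :=
  let cs := s.toList
  let n := cs.length
  -- total = n if s[0] in 'aknqy' else 0  (s[0] raises IndexError on empty s: excluded by Pre_)
  let total : Int := if PySem.List.pyGetD cs 0 ' ' ∈ pvVowels then (n : Int) else 0
  (PySem.List.pyRange 1 (n : Int) 1).foldl (fun total j =>
      if PySem.List.pyGetD cs j ' ' ∈ pvVowels then total + (j + 1) * ((n : Int) - j) else total)
    total

-- ===== PRECONDITION & SPEC =====
-- Pre_ excludes only the empty string, on which both Pythons raise IndexError at s[0].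
def Pre_countVowels_dp (s : String) : Prop := s.toList ≠ []
instance (s : String) : Decidable (Pre_countVowels_dp s) := by unfold Pre_countVowels_dp; infer_instance

def pvWitness_countVowels_dp : String := "banyaknya"

def Spec_countVowels_dp (s : String) (out : Int) : Prop := out = countVowels_dp_alt s
instance (s : String) (out : Int) : Decidable (Spec_countVowels_dp s out) := by unfold Spec_countVowels_dp; infer_instance

-- ===== CLAIM (what is proved, stated in full; the proofs are below) =====
def Claim_equal_countVowels_dp : Prop := ∀ (s : String), Dom_countVowels_dp s → Pre_countVowels_dp s → Spec_countVowels_dp s (countVowels_dp s)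

-- ===== LEMMAS AND PROOFS =====

-- g cs k = the weight (k+1) if cs[k] is a 'vowel', else 0
def pvG (cs : List Char) (k : Nat) : Int :=
  if cs.getD k ' ' ∈ pvVowels then ((k : Int) + 1) else 0

-- F cs k = dp[k-1] after the loop has filled position k-1 = Σ_{j<k} g j
def pvF (cs : List Char) : Nat → Int
  | 0 => 0
  | k + 1 => pvF cs k + pvG cs k

-- the filled prefix of A's dp array after k positions are set
def pvP (cs : List Char) (k : Nat) : List Int :=
  (List.range k).map (fun i => pvF cs (i + 1))

-- W cs n k = Σ_{j<k} g j * (n - j) = B's running total after k positions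
def pvW (cs : List Char) (n : Nat) : Nat → Int
  | 0 => 0
  | k + 1 => pvW cs n k + pvG cs k * ((n : Int) - (k : Int))

theorem pvP_succ (cs : List Char) (k : Nat) :
    pvP cs (k + 1) = pvP cs k ++ [pvF cs (k + 1)] := by
  simp [pvP, List.range_succ]

theorem pvP_length (cs : List Char) (k : Nat) : (pvP cs k).length = k := by
  simp [pvP]

theorem pvP_getD_last (cs : List Char) (k : Nat) (zs : List Int) :
    ((pvP cs (k + 1) ++ zs).getD k 0) = pvF cs (k + 1) := by
  rw [pvP_succ]
  rw [List.getD_eq_getElem?_getD, List.append_assoc,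
      List.getElem?_append_right (by simp [pvP_length])]
  simp [pvP_length]

-- the bridge: sum of A's filled prefix + (n-k)·(last entry) = B's running total
theorem pvBridge (cs : List Char) (n : Nat) (k : Nat) :
    (pvP cs k).sum + ((n : Int) - (k : Int)) * pvF cs k = pvW cs n k := by
  induction k with
  | zero => simp [pvP, pvF, pvW]
  | succ k ih =>
    rw [pvP_succ, pvW]
    simp only [List.sum_append, List.sum_cons, List.sum_nil]
    have hF : pvF cs (k + 1) = pvF cs k + pvG cs k := rfl
    push_cast
    rw [hF]
    rw [← ih]
    ring

-- A's loop invariant: after processing indices 1..k-1, dp = filled prefix ++ zeros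
theorem pvA_loop (cs : List Char) (k : Nat) (hk : 1 ≤ k) (hkn : k ≤ cs.length) :
    (PySem.List.pyRange 1 (k : Int) 1).foldl (fun dp i =>
      if PySem.List.pyGetD cs i ' ' ∈ pvVowels then
        PySem.List.pySetD dp i (PySem.List.pyGetD dp (i - 1) 0 + (i + 1))
      else
        PySem.List.pySetD dp i (PySem.List.pyGetD dp (i - 1) 0))
      (pvP cs 1 ++ List.replicate (cs.length - 1) (0 : Int))
    = pvP cs k ++ List.replicate (cs.length - k) (0 : Int) := by
  induction k with
  | zero => omega
  | succ k ih =>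
    rcases Nat.lt_or_ge k 1 with h1 | h1
    · -- k = 0: range 1 1 is empty
      have : k = 0 := by omega
      subst this
      rw [PySem.List.pyRange_one_eq_nil (by norm_num), List.foldl_nil]
    · have hkn' : k ≤ cs.length := by omega
      have hcast : ((k : Int) + 1) = ((k + 1 : Nat) : Int) := by push_cast; ring
      rw [← hcast, PySem.List.pyRange_one_succ_right (by exact_mod_cast h1),
          List.foldl_append, ih h1 hkn', List.foldl_cons, List.foldl_nil]
      have hget : PySem.List.pyGetD (pvP cs k ++ List.replicate (cs.length - k) (0 : Int))
          ((k : Int) - 1) 0 = pvF cs k := by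
        have : ((k : Int) - 1) = ((k - 1 : Nat) : Int) := by omega
        rw [this, PySem.List.pyGetD_natCast]
        obtain ⟨m, rfl⟩ : ∃ m, k = m + 1 := ⟨k - 1, by omega⟩
        simpa using pvP_getD_last cs m (List.replicate (cs.length - (m + 1)) (0 : Int))
      have hrep : List.replicate (cs.length - k) (0 : Int)
          = 0 :: List.replicate (cs.length - (k + 1)) (0 : Int) := by
        have : cs.length - k = (cs.length - (k + 1)) + 1 := by omega
        rw [this, List.replicate_succ]
      have hset : ∀ v : Int,
          PySem.List.pySetD (pvP cs k ++ List.replicate (cs.length - k) (0 : Int)) ((k : Int)) v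
          = pvP cs k ++ v :: List.replicate (cs.length - (k + 1)) (0 : Int) := by
        intro v
        rw [PySem.List.pySetD_natCast, hrep]
        have hlen : (pvP cs k).length = k := pvP_length cs k
        calc (pvP cs k ++ 0 :: List.replicate (cs.length - (k + 1)) (0 : Int)).set k v
            = (pvP cs k ++ 0 :: List.replicate (cs.length - (k + 1)) (0 : Int)).set
                ((pvP cs k).length) v := by rw [hlen]
          _ = _ := by simp
      simp only [hget, hset, pvP_succ, List.append_assoc, List.singleton_append]
      simp only [PySem.List.pyGetD_natCast]
      have hFsucc : pvF cs (k + 1) = pvF cs k + pvG cs k := rfl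
      rw [hFsucc, pvG]
      split_ifs with h <;> simp

-- B's loop invariant
theorem pvB_loop (cs : List Char) (n : Nat) (k : Nat) (hk : 1 ≤ k) :
    (PySem.List.pyRange 1 (k : Int) 1).foldl (fun total j =>
      if PySem.List.pyGetD cs j ' ' ∈ pvVowels then
        total + (j + 1) * ((n : Int) - j) else total)
      (pvW cs n 1)
    = pvW cs n k := by
  induction k with
  | zero => omega
  | succ k ih =>
    rcases Nat.lt_or_ge k 1 with h1 | h1
    · have : k = 0 := by omega
      subst this
      rw [PySem.List.pyRange_one_eq_nil (by norm_num), List.foldl_nil]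
    · have hcast : ((k : Int) + 1) = ((k + 1 : Nat) : Int) := by push_cast; ring
      rw [← hcast, PySem.List.pyRange_one_succ_right (by exact_mod_cast h1),
          List.foldl_append, ih h1, List.foldl_cons, List.foldl_nil]
      rw [pvW]
      simp only [PySem.List.pyGetD_natCast, pvG]
      split_ifs <;> ring

-- ===== VERDICT (by name: the statement is the Claim_ definition above) =====
theorem countVowels_dp_spec : Claim_equal_countVowels_dp := by
  intro s _ hpre
  unfold Spec_countVowels_dp countVowels_dp countVowels_dp_alt
  set cs := s.toList with hcs
  obtain ⟨c, rest, hrep⟩ : ∃ c rest, cs = c :: rest := by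
    cases h : cs with
    | nil => exact absurd h hpre
    | cons c rest => exact ⟨c, rest, rfl⟩
  have hn : 1 ≤ cs.length := by rw [hrep]; simp
  -- initial states
  have hinit0 : PySem.List.pyGetD cs 0 ' ' = cs.getD 0 ' ' := PySem.List.pyGetD_zero cs ' '
  have hA0 : PySem.List.pySetD (List.replicate cs.length (0 : Int)) 0
        (if PySem.List.pyGetD cs 0 ' ' ∈ pvVowels then 1 else 0)
      = pvP cs 1 ++ List.replicate (cs.length - 1) (0 : Int) := by
    rw [hrep]
    simp [List.replicate_succ, PySem.List.pySetD_of_nonneg, PySem.List.pyGetD_zero,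
      pvP, pvF, pvG]
  have hB0 : (if PySem.List.pyGetD cs 0 ' ' ∈ pvVowels then ((cs.length : Int)) else 0)
      = pvW cs cs.length 1 := by
    rw [hinit0]
    simp only [pvW, pvG]
    split_ifs <;> ring
  simp only [hA0, hB0]
  rw [pvA_loop cs cs.length (by omega) (le_refl _), pvB_loop cs cs.length cs.length (by omega)]
  have := pvBridge cs cs.length cs.length
  simp only [sub_self, zero_mul, add_zero] at this
  simpa using this
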